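-- pv_equiv track=rewrite | github.com/docomomobr/anais | regionais/sul/sdsul08/fontes/extrair_metadados_pdf.py | ordered_article
-- ===== SOURCE A (Python) =====
-- from collections import OrderedDict
--
-- def ordered_article(art):
--     """Reorder article fields to match existing convention plus new fields."""
--     ORDER = [
--         'id', 'seminario', 'titulo', 'subtitulo', 'locale', 'secao', 'paginas',
--         'autores',
--         'arquivo_pdf',
--         'resumo', 'resumo_en',
--         'palavras_chave', 'palavras_chave_en',
--         'paginas_count',
--         'referencias',
--         'status',
--     ]
--     ordered = OrderedDict()
--     for key in ORDER:
--         if key in art: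
--             ordered[key] = art[key]
--     # Add any remaining keys not in ORDER
--     for key in art:
--         if key not in ordered:
--             ordered[key] = art[key]
--     return ordered
-- ===== SOURCE B (Python) =====
-- from collections import OrderedDict
--
-- def ordered_article(art):
--     """Reorder article fields: bucket each item by its position in the fixed
--     key order (unknown keys go to the last bucket), then concatenate."""
--     ORDER = [
--         'id', 'seminario', 'titulo', 'subtitulo', 'locale', 'secao', 'paginas',
--         'autores',
--         'arquivo_pdf',
--         'resumo', 'resumo_en',
--         'palavras_chave', 'palavras_chave_en',
--         'paginas_count',
--         'referencias',
--         'status',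
--     ]
--     n = len(ORDER)
--     pos = {k: i for i, k in enumerate(ORDER)}
--     buckets = [[] for _ in range(n + 1)]
--     for kv in art.items():
--         buckets[pos.get(kv[0], n)].append(kv)
--     return OrderedDict(kv for b in buckets for kv in b)
-- ===== Notes on version B (the rewrite author's own statement) =====
-- stated objective: alternative
-- what changed: Replaces A's two membership-checking insertion loops (scan ORDER with lookups, then scan art against the growing result) with a single bucket pass: a position-index dict built once, each item dropped into the bucket of its ORDER position (unknown keys into a trailing bucket), and the buckets concatenated.
import Mathlib
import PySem

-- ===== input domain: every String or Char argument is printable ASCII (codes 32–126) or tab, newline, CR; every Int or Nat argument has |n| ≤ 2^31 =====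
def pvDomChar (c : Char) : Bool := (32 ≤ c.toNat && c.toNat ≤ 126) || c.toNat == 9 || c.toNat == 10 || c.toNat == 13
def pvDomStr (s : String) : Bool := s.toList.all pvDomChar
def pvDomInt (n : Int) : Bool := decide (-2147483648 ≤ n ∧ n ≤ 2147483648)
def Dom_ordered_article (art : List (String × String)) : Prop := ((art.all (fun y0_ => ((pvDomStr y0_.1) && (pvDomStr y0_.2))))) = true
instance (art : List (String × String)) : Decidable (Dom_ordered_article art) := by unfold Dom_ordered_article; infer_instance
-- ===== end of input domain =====

-- B replaces A's two membership-checking insertion loops with a single bucket pass over the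
-- dict items (bucket = position of the key in the fixed ORDER, unknown keys in a trailing
-- bucket) followed by concatenation; same return value, alternative algorithm.
-- ===== PORT A =====
def pvORDER : List String := ["id","seminario","titulo","subtitulo","locale","secao","paginas","autores","arquivo_pdf","resumo","resumo_en","palavras_chave","palavras_chave_en","paginas_count","referencias","status"]

def ordered_article (art : List (String × String)) : List (String × String) :=
  let d := PySem.Dict.ofList art
  let ordered := pvORDER.foldl (fun (o : PySem.Dict String String) key =>
      match d.get? key with
      | some v => o.insert key v
      | none => o) PySem.Dict.empty
  let ordered := d.keys.foldl (fun (o : PySem.Dict String String) key =>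
      if o.contains key then o
      else match d.get? key with
        | some v => o.insert key v
        | none => o) ordered
  ordered.items

-- ===== PORT B =====
def pvPos : PySem.Dict String Int :=
  (PySem.List.enumerate pvORDER 0).foldl (fun (p : PySem.Dict String Int) ik => p.insert ik.2 ik.1) PySem.Dict.empty

def ordered_article_alt (art : List (String × String)) : List (String × String) :=
  let d := PySem.Dict.ofList art
  let n := pvORDER.length
  let buckets := d.items.foldl (fun (bs : List (List (String × String))) kv =>
      let i := (pvPos.getD kv.1 (n : Int)).toNat
      bs.set i ((bs.getD i []) ++ [kv]))
    (List.replicate (n + 1) [])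
  buckets.flatten

-- ===== PRECONDITION & SPEC =====
def Spec_ordered_article (art : List (String × String)) (out : List (String × String)) : Prop := out = ordered_article_alt art
instance (art : List (String × String)) (out : List (String × String)) : Decidable (Spec_ordered_article art out) := by unfold Spec_ordered_article; infer_instance

-- ===== CLAIM (what is proved, stated in full; the proofs are below) =====
def Claim_equal_ordered_article : Prop := ∀ (art : List (String × String)), Dom_ordered_article art → Spec_ordered_article art (ordered_article art)

-- ===== LEMMAS AND PROOFS =====

def pvF (d : PySem.Dict String String) (k : String) : Option (String × String) :=
  (d.get? k).map (fun v => (k, v))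

def pvC (art : List (String × String)) : List (String × String) :=
  pvORDER.filterMap (pvF (PySem.Dict.ofList art))
    ++ (PySem.Dict.ofList art).items.filter (fun kv => !(decide (kv.1 ∈ pvORDER)))

lemma pos_idx (k : String) : pvPos.getD k 16 = (pvORDER.idxOf k : Int) := by
  by_cases h0 : k = "id"
  · subst h0; decide
  by_cases h1 : k = "seminario"
  · subst h1; decide
  by_cases h2 : k = "titulo"
  · subst h2; decide
  by_cases h3 : k = "subtitulo"
  · subst h3; decide
  by_cases h4 : k = "locale"
  · subst h4; decide
  by_cases h5 : k = "secao"
  · subst h5; decide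
  by_cases h6 : k = "paginas"
  · subst h6; decide
  by_cases h7 : k = "autores"
  · subst h7; decide
  by_cases h8 : k = "arquivo_pdf"
  · subst h8; decide
  by_cases h9 : k = "resumo"
  · subst h9; decide
  by_cases h10 : k = "resumo_en"
  · subst h10; decide
  by_cases h11 : k = "palavras_chave"
  · subst h11; decide
  by_cases h12 : k = "palavras_chave_en"
  · subst h12; decide
  by_cases h13 : k = "paginas_count"
  · subst h13; decide
  by_cases h14 : k = "referencias"
  · subst h14; decide
  by_cases h15 : k = "status"
  · subst h15; decide
  have hidx : pvORDER.idxOf k = 16 := by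
    have hnm : k ∉ pvORDER := by simp [pvORDER]; exact ⟨h0, h1, h2, h3, h4, h5, h6, h7, h8, h9, h10, h11, h12, h13, h14, h15⟩
    simpa [pvORDER] using List.idxOf_eq_length_iff.mpr hnm
  rw [hidx]
  simp only [PySem.Dict.getD_eq_get?_getD]
  have hg : pvPos.get? k = none := by
    simp [pvPos, pvORDER, PySem.List.enumerate, PySem.Dict.get?_insert, PySem.Dict.get?_empty, h0, h1, h2, h3, h4, h5, h6, h7, h8, h9, h10, h11, h12, h13, h14, h15]
  rw [hg]; rfl

lemma pvIdx_eq (k : String) : (pvPos.getD k 16).toNat = pvORDER.idxOf k := by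
  rw [pos_idx]; exact Int.toNat_natCast _

-- ============ A side ============

lemma foldA1 (d : PySem.Dict String String) :
    ∀ (ks : List String) (o : PySem.Dict String String), ks.Nodup →
      (∀ k ∈ ks, o.contains k = false) →
      (ks.foldl (fun o key =>
        match d.get? key with
        | some v => o.insert key v
        | none => o) o).items = o.items ++ ks.filterMap (pvF d) := by
  intro ks
  induction ks with
  | nil => intro o _ _; simp
  | cons k rest ih =>
      intro o hnd hfr
      have hk : o.contains k = false := hfr k (by simp)
      have hndr : rest.Nodup := hnd.of_cons
      have hknr : k ∉ rest := (List.nodup_cons.mp hnd).1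
      cases h : d.get? k with
      | none =>
          rw [List.foldl_cons, h,
            ih o hndr (fun k' hx => hfr k' (List.mem_cons_of_mem _ hx))]
          simp [pvF, h]
      | some v =>
          have hfr' : ∀ k' ∈ rest, (o.insert k v).contains k' = false := by
            intro k' hx
            rw [PySem.Dict.contains_insert]
            have hne : (k' == k) = false := by
              simp only [beq_eq_false_iff_ne, ne_eq]
              rintro rfl; exact hknr hx
            simp [hne, hfr k' (List.mem_cons_of_mem _ hx)]
          rw [List.foldl_cons, h, ih _ hndr hfr',
            PySem.Dict.items_insert_of_not_contains _ _ hk]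
          simp [pvF, h]

lemma foldA2 (d : PySem.Dict String String) :
    ∀ (ks : List String) (o : PySem.Dict String String), ks.Nodup →
      (∀ k ∈ ks, (d.get? k).isSome) →
      (ks.foldl (fun o key =>
        if o.contains key then o
        else match d.get? key with
          | some v => o.insert key v
          | none => o) o).items
      = o.items ++ (ks.filter (fun k => !(o.contains k))).filterMap (pvF d) := by
  intro ks
  induction ks with
  | nil => intro o _ _; simp
  | cons k rest ih =>
      intro o hnd hsm
      have hndr : rest.Nodup := hnd.of_cons
      have hknr : k ∉ rest := (List.nodup_cons.mp hnd).1
      have hsmr : ∀ k' ∈ rest, (d.get? k').isSome := fun k' hx => hsm k' (List.mem_cons_of_mem _ hx)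
      by_cases hc : o.contains k
      · rw [List.foldl_cons]
        simp only [hc, if_true]
        rw [ih o hndr hsmr]
        have heq : (k :: rest).filter (fun k => !(o.contains k)) = rest.filter (fun k => !(o.contains k)) := by
          simp [hc]
        rw [heq]
      · obtain ⟨v, hv⟩ := Option.isSome_iff_exists.mp (hsm k (by simp))
        rw [List.foldl_cons]
        simp only [hc, if_false, Bool.false_eq_true, hv]
        rw [ih _ hndr hsmr]
        have hcb : o.contains k = false := by simpa using hc
        have hfeq : rest.filter (fun k' => !((o.insert k v).contains k')) = rest.filter (fun k' => !(o.contains k')) := by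
          apply List.filter_congr
          intro k' hx
          rw [PySem.Dict.contains_insert]
          have hne : (k' == k) = false := by
            simp only [beq_eq_false_iff_ne, ne_eq]
            rintro rfl; exact hknr hx
          simp [hne]
        rw [hfeq, PySem.Dict.items_insert_of_not_contains _ _ hcb]
        have hfcons : (k :: rest).filter (fun k' => !(o.contains k')) = k :: rest.filter (fun k' => !(o.contains k')) := by
          simp [hcb]
        rw [hfcons]
        simp [pvF, hv]

lemma mapfst_filterMap (d : PySem.Dict String String) (ks : List String) :
    (ks.filterMap (pvF d)).map Prod.fst = ks.filter (fun k => (d.get? k).isSome) := by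
  induction ks with
  | nil => rfl
  | cons k rest ih =>
      simp only [pvF] at ih ⊢
      cases h : d.get? k <;> simp [h, ih]

lemma assoc_filter (d : PySem.Dict String String) (p : String → Bool) :
    ∀ (l : List (String × String)), (∀ kv ∈ l, d.get? kv.1 = some kv.2) →
      ((l.map Prod.fst).filter p).filterMap (pvF d) = l.filter (fun kv => p kv.1) := by
  intro l
  induction l with
  | nil => intro _; rfl
  | cons kv rest ih =>
      intro h
      have hkv : d.get? kv.1 = some kv.2 := h kv (by simp)
      have hrest := ih (fun x hx => h x (List.mem_cons_of_mem _ hx))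
      simp only [pvF] at hrest ⊢
      by_cases hp : p kv.1 = true
      · simp [hp, hkv, hrest]
      · simp [hp, hrest]

lemma a_eq_C (art : List (String × String)) : ordered_article art = pvC art := by
  unfold ordered_article pvC
  dsimp only
  have hnodup : (PySem.Dict.ofList art).keys.Nodup := PySem.Dict.nodup_keys_ofList art
  have hsub : ∀ kv ∈ (PySem.Dict.ofList art).items, (PySem.Dict.ofList art).get? kv.1 = some kv.2 :=
    fun kv hkv => PySem.Dict.get?_of_mem_items _ hkv hnodup
  have h1 := foldA1 (PySem.Dict.ofList art) pvORDER PySem.Dict.empty (by decide)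
    (fun k _ => PySem.Dict.contains_empty k)
  have hsm : ∀ k ∈ (PySem.Dict.ofList art).keys, ((PySem.Dict.ofList art).get? k).isSome := by
    intro k hk
    rw [Option.isSome_iff_ne_none]
    intro hn
    exact ((PySem.Dict.get?_eq_none_iff_not_mem_keys _ _).mp hn) hk
  rw [foldA2 (PySem.Dict.ofList art) (PySem.Dict.ofList art).keys _ hnodup hsm, h1]
  rw [show PySem.Dict.empty.items = ([] : List (String × String)) from rfl, List.nil_append]
  congr 1
  have hcont : ∀ k ∈ (PySem.Dict.ofList art).keys,
      (!((pvORDER.foldl (fun (o : PySem.Dict String String) key =>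
        match (PySem.Dict.ofList art).get? key with
        | some v => o.insert key v
        | none => o) PySem.Dict.empty).contains k))
      = (!(decide (k ∈ pvORDER))) := by
    intro k hk
    have hkeys : (pvORDER.foldl (fun (o : PySem.Dict String String) key =>
        match (PySem.Dict.ofList art).get? key with
        | some v => o.insert key v
        | none => o) PySem.Dict.empty).keys = pvORDER.filter (fun k => ((PySem.Dict.ofList art).get? k).isSome) := by
      show (_ : PySem.Dict String String).items.map Prod.fst = _
      rw [h1]
      simpa using mapfst_filterMap (PySem.Dict.ofList art) pvORDER
    rw [PySem.Dict.contains_eq_decide_mem_keys, hkeys]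
    have hks : ((PySem.Dict.ofList art).get? k).isSome := hsm k hk
    by_cases hm : k ∈ pvORDER
    · have hmem : k ∈ pvORDER.filter (fun k => ((PySem.Dict.ofList art).get? k).isSome) :=
        List.mem_filter.mpr ⟨hm, hks⟩
      simp [hmem, hm]
    · have hnmem : k ∉ pvORDER.filter (fun k => ((PySem.Dict.ofList art).get? k).isSome) := by
        intro hc; exact hm (List.mem_filter.mp hc).1
      simp [hnmem, hm]
  rw [List.filter_congr hcont]
  have : (PySem.Dict.ofList art).keys = (PySem.Dict.ofList art).items.map Prod.fst := rfl
  rw [this]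
  exact assoc_filter (PySem.Dict.ofList art) (fun k => !(decide (k ∈ pvORDER))) _ hsub

-- ============ B side ============

lemma bucket_len {α : Type} (idx : α → Nat) :
    ∀ (l : List α) (bs : List (List α)),
      (l.foldl (fun bs x => bs.set (idx x) ((bs.getD (idx x) []) ++ [x])) bs).length = bs.length := by
  intro l
  induction l with
  | nil => intro bs; rfl
  | cons x rest ih =>
      intro bs
      rw [List.foldl_cons, ih, List.length_set]

lemma bucket_getD {α : Type} (idx : α → Nat) :
    ∀ (l : List α) (bs : List (List α)) (j : Nat), (∀ x ∈ l, idx x < bs.length) →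
      (l.foldl (fun bs x => bs.set (idx x) ((bs.getD (idx x) []) ++ [x])) bs).getD j []
        = bs.getD j [] ++ l.filter (fun x => idx x == j) := by
  intro l
  induction l with
  | nil => intro bs j _; simp
  | cons x rest ih =>
      intro bs j hlt
      have hx : idx x < bs.length := hlt x (by simp)
      have hrest : ∀ y ∈ rest, idx y < (bs.set (idx x) ((bs.getD (idx x) []) ++ [x])).length := by
        intro y hy; rw [List.length_set]; exact hlt y (List.mem_cons_of_mem _ hy)
      rw [List.foldl_cons, ih _ j hrest]
      by_cases hj : idx x = j
      · subst hj
        have hset : (bs.set (idx x) ((bs.getD (idx x) []) ++ [x])).getD (idx x) [] = (bs.getD (idx x) []) ++ [x] := by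
          simp [List.getD_eq_getElem?_getD, hx]
        rw [hset]
        simp
      · have hset : (bs.set (idx x) ((bs.getD (idx x) []) ++ [x])).getD j [] = bs.getD j [] := by
          simp [List.getD_eq_getElem?_getD, hj]
        rw [hset]
        simp [hj]

lemma self_range_getD {α : Type} (bs : List (List α)) :
    bs = (List.range bs.length).map (fun j => bs.getD j []) := by
  apply List.ext_getElem
  · simp
  · intro j h1 h2
    simp [List.getD_eq_getElem?_getD, List.getElem?_eq_getElem (by simpa using h2)]

lemma map_range_getD (ks : List String) (g : String → List (String × String)) :
    (List.range ks.length).map (fun j => g (ks.getD j "")) = ks.map g := by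
  apply List.ext_getElem
  · simp
  · intro j h1 h2
    have hj : j < ks.length := by simpa using h2
    simp [List.getD_eq_getElem?_getD, List.getElem?_eq_getElem hj]

lemma filterMap_eq_flatten_map (ks : List String) (g : String → Option (String × String)) :
    ks.filterMap g = (ks.map (fun k => (g k).toList)).flatten := by
  induction ks with
  | nil => rfl
  | cons k rest ih => cases h : g k <;> simp [h, ih]

lemma filter_key_eq (d : PySem.Dict String String) (hnodup : d.keys.Nodup) (k : String) :
    d.items.filter (fun kv => kv.1 == k) = (pvF d k).toList := by
  have hsub : ∀ kv ∈ d.items, d.get? kv.1 = some kv.2 :=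
    fun kv hkv => PySem.Dict.get?_of_mem_items _ hkv hnodup
  have h := assoc_filter d (fun x => x == k) d.items hsub
  rw [← h]
  have hkeys : d.items.map Prod.fst = d.keys := rfl
  rw [hkeys]
  by_cases hm : k ∈ d.keys
  · have h1 : d.keys.filter (fun x => x == k) = [k] := by
      rw [List.filter_beq, List.count_eq_one_of_mem hnodup hm, List.replicate_one]
    rw [h1]
    cases hf : pvF d k with
    | none => simp [hf]
    | some p => simp [hf]
  · have h0 : d.keys.filter (fun x => x == k) = [] := by
      rw [List.filter_eq_nil_iff]
      intro a ha
      simp only [beq_iff_eq]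
      intro hak; exact hm (hak ▸ ha)
    rw [h0]
    have hnone : d.get? k = none := (PySem.Dict.get?_eq_none_iff_not_mem_keys _ _).mpr hm
    simp [pvF, hnone]

lemma b_eq_C (art : List (String × String)) : ordered_article_alt art = pvC art := by
  unfold ordered_article_alt pvC
  dsimp only
  have hnodup : (PySem.Dict.ofList art).keys.Nodup := PySem.Dict.nodup_keys_ofList art
  have hcast : ((pvORDER.length : Nat) : Int) = (16 : Int) := rfl
  rw [hcast]
  have hOn : pvORDER.length + 1 = 17 := rfl
  rw [hOn]
  set l := (PySem.Dict.ofList art).items with hl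
  set idx : (String × String) → Nat := fun kv => (pvPos.getD kv.1 16).toNat with hidx
  have hlt : ∀ kv ∈ l, idx kv < (List.replicate 17 ([] : List (String × String))).length := by
    intro kv _
    rw [List.length_replicate, hidx]
    dsimp only
    rw [pvIdx_eq]
    have := List.idxOf_le_length (a := kv.1) (l := pvORDER)
    omega
  have hblen : (l.foldl (fun bs kv => bs.set (idx kv) ((bs.getD (idx kv) []) ++ [kv]))
      (List.replicate 17 [])).length = 17 := by
    rw [bucket_len idx l (List.replicate 17 []), List.length_replicate]
  have hbuck : (l.foldl (fun bs kv => bs.set (idx kv) ((bs.getD (idx kv) []) ++ [kv]))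
      (List.replicate 17 []))
      = (List.range 17).map (fun j => l.filter (fun kv => idx kv == j)) := by
    conv_lhs => rw [self_range_getD (l.foldl (fun bs kv => bs.set (idx kv) ((bs.getD (idx kv) []) ++ [kv])) (List.replicate 17 []))]
    rw [hblen]
    apply List.map_congr_left
    intro j _
    rw [bucket_getD idx l (List.replicate 17 []) j hlt]
    have hrep : (List.replicate 17 ([] : List (String × String))).getD j [] = [] := by
      rw [List.getD_eq_getElem?_getD, List.getElem?_replicate]
      split <;> rfl
    rw [hrep, List.nil_append]
  rw [hbuck]
  have hr17 : List.range 17 = List.range 16 ++ [16] := List.range_succ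
  rw [hr17, List.map_append, List.flatten_append]
  congr 1
  · -- known keys part
    have h16 : (16 : Nat) = pvORDER.length := rfl
    have hmapeq : (List.range 16).map (fun j => l.filter (fun kv => idx kv == j))
        = (List.range pvORDER.length).map (fun j => (pvF (PySem.Dict.ofList art) (pvORDER.getD j "")).toList) := by
      rw [← h16]
      apply List.map_congr_left
      intro j hj
      have hjlt : j < 16 := List.mem_range.mp hj
      have hpred : ∀ kv : String × String, (idx kv == j) = (kv.1 == pvORDER.getD j "") := by
        intro kv
        rw [hidx]
        dsimp only
        rw [pvIdx_eq]
        have hjlt' : j < pvORDER.length := hjlt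
        have hgetD : pvORDER.getD j "" = pvORDER[j]'hjlt' := by
          rw [List.getD_eq_getElem?_getD, List.getElem?_eq_getElem hjlt']
          rfl
        by_cases hk : kv.1 = pvORDER[j]'hjlt'
        · rw [hgetD, hk]
          have : pvORDER.idxOf (pvORDER[j]'hjlt') = j :=
            List.Nodup.idxOf_getElem (by decide) j hjlt'
          simp [this]
        · rw [hgetD]
          have hne2 : pvORDER.idxOf kv.1 ≠ j := by
            intro hc
            apply hk
            have hlt2 : pvORDER.idxOf kv.1 < pvORDER.length := by omega
            have hgl := List.getElem_idxOf hlt2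
            subst hc
            exact hgl.symm
          simp [hne2, hk]
      rw [List.filter_congr (fun kv _ => hpred kv)]
      exact filter_key_eq (PySem.Dict.ofList art) hnodup (pvORDER.getD j "")
    rw [hmapeq, map_range_getD pvORDER (fun k => (pvF (PySem.Dict.ofList art) k).toList)]
    exact (filterMap_eq_flatten_map pvORDER (pvF (PySem.Dict.ofList art))).symm
  · -- unknown keys part
    simp only [List.map_cons, List.map_nil, List.flatten_cons, List.flatten_nil, List.append_nil]
    apply List.filter_congr
    intro kv _
    rw [hidx]
    dsimp only
    rw [pvIdx_eq]
    have h16 : pvORDER.length = 16 := rfl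
    by_cases hm : kv.1 ∈ pvORDER
    · have h1 : pvORDER.idxOf kv.1 < 16 := by
        have := List.idxOf_lt_length_of_mem hm
        omega
      have hb : (pvORDER.idxOf kv.1 == 16) = false := by
        simp only [beq_eq_false_iff_ne, ne_eq]
        omega
      rw [hb]
      simp [hm]
    · have h1 : pvORDER.idxOf kv.1 = 16 := by
        have := List.idxOf_eq_length_iff.mpr hm
        omega
      rw [h1]
      simp [hm]

-- ===== VERDICT (by name: the statement is the Claim_ definition above) =====
theorem ordered_article_spec : Claim_equal_ordered_article := by
  intro art _
  unfold Spec_ordered_article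
  rw [a_eq_C, b_eq_C]
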